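-- pv_equiv track=rewrite | github.com/twishi/PDBAnalysis | files/Main.py | charge_nette
-- ===== SOURCE A (Python) =====
-- acides_amines_positifs = ["R", "K", "H"]
--
-- acides_amines_negatifs = ["D", "E"]
--
-- def charge_nette(sequence1L):
--     l=0
--     for AA in sequence1L:
--         if AA in acides_amines_positifs:
--             l=l+1
--         elif AA in acides_amines_negatifs:
--             l=l-1
--     return(l)
-- ===== SOURCE B (Python) =====
-- acides_amines_positifs = ["R", "K", "H"]
--
-- acides_amines_negatifs = ["D", "E"]
--
-- def charge_nette(sequence1L):
--     counts = {}
--     for AA in sequence1L: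
--         counts[AA] = counts.get(AA, 0) + 1
--     return (sum(counts.get(a, 0) for a in acides_amines_positifs)
--             - sum(counts.get(a, 0) for a in acides_amines_negatifs))
-- ===== Notes on version B (the rewrite author's own statement) =====
-- stated objective: alternative
-- what changed: B builds a frequency table of the sequence once and then sums the counts of the positive residues R,K,H minus the counts of the negative residues D,E, instead of A's single conditional accumulating loop.
import Mathlib
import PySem

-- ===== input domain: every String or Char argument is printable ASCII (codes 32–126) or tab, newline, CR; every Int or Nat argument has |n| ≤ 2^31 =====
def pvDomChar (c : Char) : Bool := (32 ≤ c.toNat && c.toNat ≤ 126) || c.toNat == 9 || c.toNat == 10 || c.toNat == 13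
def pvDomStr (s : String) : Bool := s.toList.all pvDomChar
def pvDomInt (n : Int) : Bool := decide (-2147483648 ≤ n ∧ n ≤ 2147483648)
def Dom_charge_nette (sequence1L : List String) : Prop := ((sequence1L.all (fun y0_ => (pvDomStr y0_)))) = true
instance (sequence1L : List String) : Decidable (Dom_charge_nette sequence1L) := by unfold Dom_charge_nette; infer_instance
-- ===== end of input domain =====

-- B tabulates residue counts once into a dict and sums counts of R,K,H minus D,E, instead of A's conditional accumulating loop (alternative decomposition, same cost).


def acides_amines_positifs : List String := ["R", "K", "H"]

def acides_amines_negatifs : List String := ["D", "E"]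

-- ===== PORT A =====
def charge_nette (sequence1L : List String) : Int :=
  sequence1L.foldl (fun l AA =>
    if acides_amines_positifs.contains AA then l + 1
    else if acides_amines_negatifs.contains AA then l - 1
    else l) 0

-- ===== PORT B =====
def charge_nette_alt (sequence1L : List String) : Int :=
  let counts : PySem.Dict String Int :=
    sequence1L.foldl (fun d AA => d.insert AA (d.getD AA 0 + 1)) PySem.Dict.empty
  (acides_amines_positifs.foldl (fun s a => s + counts.getD a 0) 0)
    - (acides_amines_negatifs.foldl (fun s a => s + counts.getD a 0) 0)

-- ===== PRECONDITION & SPEC =====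
def Spec_charge_nette (sequence1L : List String) (out : Int) : Prop := out = charge_nette_alt sequence1L
instance (sequence1L : List String) (out : Int) : Decidable (Spec_charge_nette sequence1L out) := by unfold Spec_charge_nette; infer_instance

-- ===== CLAIM (what is proved, stated in full; the proofs are below) =====
def Claim_equal_charge_nette : Prop := ∀ (sequence1L : List String), Dom_charge_nette sequence1L → Spec_charge_nette sequence1L (charge_nette sequence1L)

-- ===== LEMMAS AND PROOFS =====

-- A's accumulating loop, from any start, equals start + (positive counts) - (negative counts).
theorem charge_nette_foldl_eq (xs : List String) (a : Int) :
    xs.foldl (fun l AA =>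
      if acides_amines_positifs.contains AA then l + 1
      else if acides_amines_negatifs.contains AA then l - 1
      else l) a
    = a + ((xs.count "R" : Int) + xs.count "K" + xs.count "H")
        - ((xs.count "D" : Int) + xs.count "E") := by
  induction xs generalizing a with
  | nil => simp
  | cons x t ih =>
    rw [List.foldl_cons, ih]
    simp only [acides_amines_positifs, acides_amines_negatifs, List.contains_eq_mem,
      List.mem_cons, List.not_mem_nil, or_false, List.count_cons]
    by_cases hR : x = "R" <;> by_cases hK : x = "K" <;> by_cases hH : x = "H" <;>
      by_cases hD : x = "D" <;> by_cases hE : x = "E" <;>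
      simp_all <;> push_cast <;> ring

theorem charge_nette_alt_eq (xs : List String) :
    charge_nette_alt xs
    = ((xs.count "R" : Int) + xs.count "K" + xs.count "H")
        - ((xs.count "D" : Int) + xs.count "E") := by
  simp only [charge_nette_alt, acides_amines_positifs, acides_amines_negatifs,
    PySem.Dict.foldl_insert_getD_add_one_eq_counter, List.foldl_cons, List.foldl_nil,
    PySem.Dict.getD_counter]
  ring

-- ===== VERDICT (by name: the statement is the Claim_ definition above) =====
theorem charge_nette_spec : Claim_equal_charge_nette := by
  intro xs _
  unfold Spec_charge_nette charge_nette
  rw [charge_nette_foldl_eq, charge_nette_alt_eq]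
  ring
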